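-- pv_equiv track=rewrite | github.com/karkabbage/ellehacks2023 | wastewell1_0.py | autocomplete_search
-- ===== SOURCE A (Python) =====
-- word_bank = {"battery": 7, "light bulb": 3, "mirror": 8, "matress": 2,
--              "paint": 3, "pesticide": 4, "computer": 8, "phone": 9, "syringe": 5, "needle": 3,
--              "aerosol": 2, "gasoline": 9, "cleaner": 4, "cd": 2, "sunglasses": 4, "glasses": 2}
--
-- def autocomplete_search(customer_word: str) -> str:
--     """
--     suggest words from word bank of all possible non-conventional recyclibles in 'real time'
--
--     Preconditions:
--     - you may ASSUME that every letter typed automatically calls this function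
--     - ASSUME ties between values have no effect, it will return the first occurence of the value
--     - customer_word letters are all miniscule and are at most, the starting letters / prefix of the word
--
--     # doctests to portray how app would react
--     >>> autocomplete_search("p")
--     'phone'
--     >>> autocomplete_search("pa")
--     'paint'
--     >>> autocomplete_search("comp")
--     'computer'
--
--     """
--
--     # loop function to go through entire word bank
--     cust_word_length = len(customer_word)
--
--     relevant_word_set = {}
--     for word in word_bank:
--         if customer_word in word and word[0] == customer_word[0] and cust_word_length <= len(word):
--             relevant_word_set[word] = word_bank[word]
--
--     if relevant_word_set == {}:
--         # this would send the user to a page with no image results, just the text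
--         return " sorry, this item is unavailible "
--
--     else:
--         # this returned word would be based off of word search relevency values
--         return max(relevant_word_set, key=relevant_word_set.get)
-- ===== SOURCE B (Python) =====
-- word_bank = {"battery": 7, "light bulb": 3, "mirror": 8, "matress": 2,
--              "paint": 3, "pesticide": 4, "computer": 8, "phone": 9, "syringe": 5, "needle": 3,
--              "aerosol": 2, "gasoline": 9, "cleaner": 4, "cd": 2, "sunglasses": 4, "glasses": 2}
--
-- # The bank is a module-level constant, so order it once, at load time: a stable
-- # value-descending sort.  Stability keeps insertion order among equal values, which is
-- # exactly max(key=get)'s first-occurrence tie rule.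
-- SORTED_BANK = sorted(word_bank.items(), key=lambda kv: kv[1], reverse=True)
--
-- def autocomplete_search(customer_word: str) -> str:
--     """Scan the precomputed value-descending bank; the first match is the answer."""
--     n = len(customer_word)
--     for word, _value in SORTED_BANK:
--         if customer_word in word and word[0] == customer_word[0] and n <= len(word):
--             return word
--     return " sorry, this item is unavailible "
-- ===== Notes on version B (the rewrite author's own statement) =====
-- stated objective: alternative
-- what changed: A filters the bank into a dict per query and then calls max(key=get); B instead orders the bank once at module load by a stable value-descending sort and answers each query by returning the FIRST word of that precomputed order that matches, exiting early -- no per-query dict, no max pass (stability makes first-match equal to max's first-occurrence tie rule).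
-- outside the precondition, e.g. on autocomplete_search(''): A raises IndexError, B raises IndexError
import Mathlib
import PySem

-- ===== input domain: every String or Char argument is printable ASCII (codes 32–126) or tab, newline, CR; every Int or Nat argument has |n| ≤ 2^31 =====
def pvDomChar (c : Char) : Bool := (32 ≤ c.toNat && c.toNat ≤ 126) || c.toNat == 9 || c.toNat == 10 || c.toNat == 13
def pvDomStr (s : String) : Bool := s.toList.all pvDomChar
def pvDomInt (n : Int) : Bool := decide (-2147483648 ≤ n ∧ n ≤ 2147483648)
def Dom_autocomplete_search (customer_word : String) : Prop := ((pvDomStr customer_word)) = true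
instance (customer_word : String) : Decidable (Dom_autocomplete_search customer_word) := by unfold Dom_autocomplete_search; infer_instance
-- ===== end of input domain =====

-- B orders the bank once (stable value-descending sort, precomputed at module load) and answers a
-- query by returning the FIRST word of that order that matches, instead of A's per-query
-- filtered-dict + max(key=get); objective: alternative.

-- ===== PORT A =====
-- the module-level word bank (a dict, ported as PySem.Dict in insertion order)
def pvBank : List (String × Int) :=
  [("battery", 7), ("light bulb", 3), ("mirror", 8), ("matress", 2),
   ("paint", 3), ("pesticide", 4), ("computer", 8), ("phone", 9), ("syringe", 5), ("needle", 3),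
   ("aerosol", 2), ("gasoline", 9), ("cleaner", 4), ("cd", 2), ("sunglasses", 4), ("glasses", 2)]

def pvWordBank : PySem.Dict String Int := PySem.Dict.mk pvBank

def autocomplete_search (customer_word : String) : String :=
  let cust_word_length := PySem.Str.len customer_word
  -- 'for word in word_bank' iterates the keys; 'customer_word in word' is Python's substring
  -- test, ported exactly as Str.find ≥ 0; word_bank[word] is a lookup (the key is always
  -- present, so the .getD 0 default is unreachable)
  let relevant : PySem.Dict String Int :=
    pvWordBank.keys.foldl (fun d word =>
      if PySem.Str.find word customer_word ≥ 0 ∧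
         PySem.Str.pyGet? word 0 = PySem.Str.pyGet? customer_word 0 ∧
         cust_word_length ≤ PySem.Str.len word
      then d.insert word ((pvWordBank.get? word).getD 0)
      else d) (PySem.Dict.mk [])
  if relevant.items = [] then " sorry, this item is unavailible "
  else
    -- max(relevant_word_set, key=relevant_word_set.get): first key of maximal value
    ((PySem.List.max? relevant.keys (fun k => (relevant.get? k).getD 0)).getD "")

-- ===== PORT B =====
-- SORTED_BANK = sorted(word_bank.items(), key=lambda kv: kv[1], reverse=True): the bank,
-- ordered once by a stable value-descending sort
def pvSortedBank : List (String × Int) :=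
  PySem.List.sorted pvBank (fun kv => kv.2) true

def autocomplete_search_alt (customer_word : String) : String :=
  let n := PySem.Str.len customer_word
  -- the for-loop with early return: first entry of SORTED_BANK satisfying the condition
  match pvSortedBank.find? (fun wv =>
      decide (PySem.Str.find wv.1 customer_word ≥ 0 ∧
        PySem.Str.pyGet? wv.1 0 = PySem.Str.pyGet? customer_word 0 ∧
        n ≤ PySem.Str.len wv.1)) with
  | some wv => wv.1
  | none => " sorry, this item is unavailible "

-- ===== PRECONDITION & SPEC =====
-- Pre_ excludes only the empty string, on which A (and B) raise IndexError at customer_word[0].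
def Pre_autocomplete_search (customer_word : String) : Prop := customer_word ≠ ""
instance (customer_word : String) : Decidable (Pre_autocomplete_search customer_word) := by
  unfold Pre_autocomplete_search; infer_instance
def pvWitness_autocomplete_search : String := "pa"

def Spec_autocomplete_search (customer_word : String) (out : String) : Prop :=
  out = autocomplete_search_alt customer_word
instance (customer_word : String) (out : String) : Decidable (Spec_autocomplete_search customer_word out) := by
  unfold Spec_autocomplete_search; infer_instance

-- ===== CLAIM (what is proved, stated in full; the proofs are below) =====
def Claim_equal_autocomplete_search : Prop := ∀ (customer_word : String), Dom_autocomplete_search customer_word → Pre_autocomplete_search customer_word → Spec_autocomplete_search customer_word (autocomplete_search customer_word)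

-- ===== LEMMAS AND PROOFS =====

-- A's 'keep the first key of maximal value', as a streaming fold over the filtered entries
def pvSel (es : List (String × Int)) (acc : Option (String × Int)) : Option (String × Int) :=
  es.foldl (fun acc wv =>
    match acc with
    | none => some wv
    | some b => if b.2 < wv.2 then some wv else some b) acc

-- the bank decorated with its insertion positions, and the injective ranking key:
-- smaller key = larger value, ties broken by earlier insertion (what both A and B select)
def pvK (db : (String × Int) × Nat) : Int := (16 - db.1.2) * 16 + (db.2 : Int)

def pvLD : List ((String × Int) × Nat) :=
  [(("battery", 7), 0), (("light bulb", 3), 1), (("mirror", 8), 2), (("matress", 2), 3),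
   (("paint", 3), 4), (("pesticide", 4), 5), (("computer", 8), 6), (("phone", 9), 7),
   (("syringe", 5), 8), (("needle", 3), 9), (("aerosol", 2), 10), (("gasoline", 9), 11),
   (("cleaner", 4), 12), (("cd", 2), 13), (("sunglasses", 4), 14), (("glasses", 2), 15)]

-- the same decorated entries in pvSortedBank's order
def pvSD : List ((String × Int) × Nat) :=
  [(("phone", 9), 7), (("gasoline", 9), 11), (("mirror", 8), 2), (("computer", 8), 6),
   (("battery", 7), 0), (("syringe", 5), 8), (("pesticide", 4), 5), (("cleaner", 4), 12),
   (("sunglasses", 4), 14), (("light bulb", 3), 1), (("paint", 3), 4), (("needle", 3), 9),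
   (("matress", 2), 3), (("aerosol", 2), 10), (("cd", 2), 13), (("glasses", 2), 15)]

-- streaming minimum under the ranking key
def pvMinK (d : List ((String × Int) × Nat)) (acc : Option ((String × Int) × Nat)) :
    Option ((String × Int) × Nat) :=
  d.foldl (fun acc e =>
    match acc with
    | none => some e
    | some b => if pvK e < pvK b then some e else some b) acc

lemma pvSel_ne_none (es : List (String × Int)) (b : String × Int) :
    pvSel es (some b) ≠ none := by
  induction es generalizing b with
  | nil => simp [pvSel]
  | cons e t ih => simp only [pvSel, List.foldl]; split <;> exact ih _

-- building the dict by inserting fresh (nodup, not-yet-present) keys appends the filtered entries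
lemma pvA_dict (q : String → Prop) [DecidablePred q] (G : String → Int) :
    ∀ (l : List String) (d : PySem.Dict String Int),
    l.Nodup → (∀ w ∈ l, d.contains w = false) →
    (l.foldl (fun d w => if q w then d.insert w (G w) else d) d).items
      = d.items ++ (l.filter (fun w => decide (q w))).map (fun w => (w, G w)) := by
  intro l
  induction l with
  | nil => intro d _ _; simp
  | cons w t ih =>
    intro d hnd hfresh
    simp only [List.foldl, List.filter]
    by_cases hq : q w
    · simp only [hq, if_true]
      have hw : d.contains w = false := hfresh w (List.mem_cons_self ..)
      have hins : (d.insert w (G w)).items = d.items ++ [(w, G w)] := by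
        simp [PySem.Dict.insert, hw]
      rw [ih (d.insert w (G w)) hnd.of_cons, hins]
      · simp
      · intro u hu
        have hne : ¬(u = w) := fun h => (List.nodup_cons.mp hnd).1 (h ▸ hu)
        have hwu : ¬(w = u) := fun h => hne h.symm
        have hfu := hfresh u (List.mem_cons_of_mem _ hu)
        simp only [PySem.Dict.contains, hins] at *
        simp [List.any_append, hfu, hwu]
    · simp only [hq, if_false]
      rw [ih d hnd.of_cons (fun u hu => hfresh u (List.mem_cons_of_mem _ hu))]
      simp

-- in an association list with nodup keys, find? of a member's key returns that member
lemma pv_find?_nodup (es : List (String × Int)) (h : (es.map Prod.fst).Nodup)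
    (wv : String × Int) (hm : wv ∈ es) :
    es.find? (fun p => p.1 == wv.1) = some wv := by
  induction es with
  | nil => cases hm
  | cons e t ih =>
    rcases List.mem_cons.mp hm with rfl | hm'
    · simp [List.find?]
    · have hne : ¬(e.1 == wv.1) = true := by
        simp only [beq_iff_eq]
        intro hkey
        exact (List.nodup_cons.mp h).1 (hkey ▸ List.mem_map_of_mem hm')
      simp only [List.find?, hne]
      exact ih ((List.nodup_cons.mp h).2) hm'

-- A's max over the keys with lookup as key function equals the streaming best, projected to keys
lemma pv_max_rel (g : String → Int) :
    ∀ (es : List (String × Int)) (acc : Option (String × Int)),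
    (∀ wv ∈ es, g wv.1 = wv.2) → (∀ b, acc = some b → g b.1 = b.2) →
    (es.map Prod.fst).foldl (fun a k =>
      match a with
      | none => some k
      | some m => if g m < g k then some k else some m) (acc.map Prod.fst)
    = (pvSel es acc).map Prod.fst := by
  intro es
  induction es with
  | nil => intro acc _ _; simp [pvSel]
  | cons e t ih =>
    intro acc hmem hacc
    simp only [List.map, List.foldl, pvSel]
    have hge : g e.1 = e.2 := hmem e (List.mem_cons_self ..)
    cases acc with
    | none =>
      exact ih (some e) (fun wv h => hmem wv (List.mem_cons_of_mem _ h))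
        (fun b hb => by cases hb; exact hge)
    | some b =>
      have hgb : g b.1 = b.2 := hacc b rfl
      simp only [Option.map_some, hgb, hge]
      by_cases hlt : b.2 < e.2
      · simp only [hlt, if_true]
        exact ih (some e) (fun wv h => hmem wv (List.mem_cons_of_mem _ h))
          (fun c hc => by cases hc; exact hge)
      · simp only [hlt, if_false]
        exact ih (some b) (fun wv h => hmem wv (List.mem_cons_of_mem _ h))
          (fun c hc => by cases hc; exact hgb)

-- streaming best-by-value over a position-increasing decorated list = streaming min of the key
lemma pvSel_minK (d : List ((String × Int) × Nat)) :
    ∀ (b : (String × Int) × Nat), (∀ e ∈ d, b.2 < e.2 ∧ e.2 < 16) → b.2 < 16 →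
    d.Pairwise (fun x y => x.2 < y.2) →
    pvSel (d.map Prod.fst) (some b.1) = (pvMinK d (some b)).map Prod.fst := by
  induction d with
  | nil => intro b _ _ _; simp [pvSel, pvMinK]
  | cons e t ih =>
    intro b hmem hb hpw
    have he := hmem e (List.mem_cons_self ..)
    have hKiff : (pvK e < pvK b) = (b.1.2 < e.1.2) := by
      unfold pvK
      have h1 : b.2 < e.2 := he.1
      have h2 : e.2 < 16 := he.2
      by_cases hv : b.1.2 < e.1.2 <;> simp only [hv, eq_iff_iff, iff_true, iff_false, not_lt] <;> omega
    simp only [pvSel, pvMinK, List.map, List.foldl, hKiff]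
    by_cases hv : b.1.2 < e.1.2
    · simp only [hv, if_true]
      exact ih e (fun f hf => ⟨(List.pairwise_cons.mp hpw).1 f hf, (hmem f (List.mem_cons_of_mem _ hf)).2⟩)
        he.2 (List.pairwise_cons.mp hpw).2
    · simp only [hv, if_false]
      exact ih b (fun f hf => hmem f (List.mem_cons_of_mem _ hf)) hb (List.pairwise_cons.mp hpw).2

lemma pvSel_minK_none (d : List ((String × Int) × Nat))
    (hr : ∀ e ∈ d, e.2 < 16) (hpw : d.Pairwise (fun x y => x.2 < y.2)) :
    pvSel (d.map Prod.fst) none = (pvMinK d none).map Prod.fst := by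
  cases d with
  | nil => simp [pvSel, pvMinK]
  | cons e t =>
    simp only [pvSel, pvMinK, List.map, List.foldl]
    exact pvSel_minK t e
      (fun f hf => ⟨(List.pairwise_cons.mp hpw).1 f hf, hr f (List.mem_cons_of_mem _ hf)⟩)
      (hr e (List.mem_cons_self ..)) (List.pairwise_cons.mp hpw).2

lemma pvMinK_ne_none (d : List ((String × Int) × Nat)) :
    ∀ b, pvMinK d (some b) ≠ none := by
  induction d with
  | nil => intro b; simp [pvMinK]
  | cons e t ih => intro b; simp only [pvMinK, List.foldl]; split <;> exact ih _

lemma pvMinK_none (d : List ((String × Int) × Nat)) :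
    pvMinK d none = none ↔ d = [] := by
  cases d with
  | nil => simp [pvMinK]
  | cons e t =>
    simp only [pvMinK, List.foldl]
    exact ⟨fun h => absurd h (pvMinK_ne_none t e), fun h => by cases h⟩

lemma pvMinK_min (d : List ((String × Int) × Nat)) :
    ∀ acc m, pvMinK d acc = some m →
    (m ∈ d ∨ acc = some m) ∧ (∀ e ∈ d, pvK m ≤ pvK e) ∧ (∀ b, acc = some b → pvK m ≤ pvK b) := by
  induction d with
  | nil =>
    intro acc m h
    simp only [pvMinK, List.foldl] at h
    exact ⟨Or.inr h, by simp, fun b hb => by rw [h] at hb; cases hb; exact le_refl _⟩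
  | cons e t ih =>
    intro acc m h
    simp only [pvMinK, List.foldl] at h
    cases acc with
    | none =>
      obtain ⟨h1, h2, h3⟩ := ih (some e) m h
      refine ⟨Or.inl ?_, fun f hf => ?_, by simp⟩
      · rcases h1 with h1 | h1
        · exact List.mem_cons_of_mem _ h1
        · cases h1; exact List.mem_cons_self ..
      · rcases List.mem_cons.mp hf with rfl | hf'
        · exact h3 f rfl
        · exact h2 f hf'
    | some b =>
      by_cases hk : pvK e < pvK b
      · simp only [hk, if_true] at h
        obtain ⟨h1, h2, h3⟩ := ih (some e) m h
        refine ⟨?_, fun f hf => ?_, fun c hc => ?_⟩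
        · rcases h1 with h1 | h1
          · exact Or.inl (List.mem_cons_of_mem _ h1)
          · cases h1; exact Or.inl (List.mem_cons_self ..)
        · rcases List.mem_cons.mp hf with rfl | hf'
          · exact h3 f rfl
          · exact h2 f hf'
        · cases hc; exact le_trans (h3 e rfl) (le_of_lt hk)
      · simp only [hk, if_false] at h
        obtain ⟨h1, h2, h3⟩ := ih (some b) m h
        refine ⟨?_, fun f hf => ?_, fun c hc => ?_⟩
        · rcases h1 with h1 | h1
          · exact Or.inl (List.mem_cons_of_mem _ h1)
          · exact Or.inr h1
        · rcases List.mem_cons.mp hf with rfl | hf'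
          · exact le_trans (h3 b rfl) (not_lt.mp hk)
          · exact h2 f hf'
        · cases hc; exact h3 _ rfl

-- the streaming minimum is permutation-invariant when the key is injective on the list
lemma pvMinK_perm (l l' : List ((String × Int) × Nat)) (hp : l.Perm l')
    (hnd : (l.map pvK).Nodup) : pvMinK l none = pvMinK l' none := by
  cases h1 : pvMinK l none with
  | none =>
    have hl : l = [] := (pvMinK_none l).mp h1
    subst hl
    rw [List.perm_nil.mp hp.symm]
    simp [pvMinK]
  | some m =>
    cases h2 : pvMinK l' none with
    | none =>
      have hl' : l' = [] := (pvMinK_none l').mp h2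
      subst hl'
      have hl : l = [] := List.perm_nil.mp hp
      subst hl
      simp [pvMinK] at h1
    | some m' =>
      obtain ⟨hm1, hmin1, -⟩ := pvMinK_min l none m h1
      obtain ⟨hm2, hmin2, -⟩ := pvMinK_min l' none m' h2
      have hm : m ∈ l := hm1.resolve_right (by simp)
      have hm' : m' ∈ l := hp.symm.subset (hm2.resolve_right (by simp))
      have hle1 : pvK m ≤ pvK m' := hmin1 m' hm'
      have hle2 : pvK m' ≤ pvK m := hmin2 m (hp.subset hm)
      have hkeq : pvK m = pvK m' := le_antisymm hle1 hle2
      have : m = m' := List.inj_on_of_nodup_map hnd hm hm' hkeq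
      rw [this]

lemma pvMinK_stay (d : List ((String × Int) × Nat)) :
    ∀ b, (∀ e ∈ d, ¬ pvK e < pvK b) → pvMinK d (some b) = some b := by
  induction d with
  | nil => intro b _; simp [pvMinK]
  | cons e t ih =>
    intro b h
    simp only [pvMinK, List.foldl, h e (List.mem_cons_self ..), if_false]
    exact ih b (fun f hf => h f (List.mem_cons_of_mem _ hf))

-- on a list sorted strictly by the key, the streaming minimum of a filter is the first match
lemma pvMinK_find (s : List ((String × Int) × Nat)) :
    ∀ q : ((String × Int) × Nat) → Bool, s.Pairwise (fun a b => pvK a < pvK b) →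
    pvMinK (s.filter q) none = s.find? q := by
  induction s with
  | nil => intro q _; simp [pvMinK]
  | cons e t ih =>
    intro q hpw
    by_cases hq : q e
    · simp only [List.filter_cons, List.find?_cons, hq, if_true]
      simp only [pvMinK, List.foldl]
      exact pvMinK_stay (t.filter q) e
        (fun f hf => not_lt.mpr (le_of_lt ((List.pairwise_cons.mp hpw).1 f (List.mem_of_mem_filter hf))))
    · simp only [List.filter_cons, List.find?_cons, hq]
      exact ih q (List.pairwise_cons.mp hpw).2

-- ===== VERDICT (by name: the statement is the Claim_ definition above) =====
theorem autocomplete_search_spec : Claim_equal_autocomplete_search := by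
  intro cw _ _
  unfold Spec_autocomplete_search autocomplete_search autocomplete_search_alt
  dsimp only
  set q : String × Int → Bool := fun wv =>
    decide (PySem.Str.find wv.1 cw ≥ 0 ∧ PySem.Str.pyGet? wv.1 0 = PySem.Str.pyGet? cw 0 ∧
      PySem.Str.len cw ≤ PySem.Str.len wv.1) with hq
  set es := pvBank.filter q with hes
  -- A's dict of relevant words lists exactly the filtered bank entries
  have hbank : ∀ wv ∈ pvBank, (pvWordBank.get? wv.1).getD 0 = wv.2 := by
    intro wv hm
    have := pv_find?_nodup pvBank (by decide) wv hm
    simp [PySem.Dict.get?, pvWordBank, this]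
  have hA : (pvWordBank.keys.foldl (fun d word =>
      if PySem.Str.find word cw ≥ 0 ∧
         PySem.Str.pyGet? word 0 = PySem.Str.pyGet? cw 0 ∧
         PySem.Str.len cw ≤ PySem.Str.len word
      then d.insert word ((pvWordBank.get? word).getD 0)
      else d) (PySem.Dict.mk [])).items = es := by
    rw [pvA_dict (fun w => PySem.Str.find w cw ≥ 0 ∧ PySem.Str.pyGet? w 0 = PySem.Str.pyGet? cw 0 ∧ PySem.Str.len cw ≤ PySem.Str.len w) (fun w => (pvWordBank.get? w).getD 0) pvWordBank.keys (PySem.Dict.mk []) (by decide) (fun w _ => rfl)]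
    have hkeys : pvWordBank.keys = pvBank.map Prod.fst := rfl
    rw [hkeys, List.filter_map, List.map_map, hes, hq]
    simp only [List.nil_append]
    apply List.map_congr_left ?_ |>.trans (List.map_id _)
    intro wv hm
    have := hbank wv (List.mem_of_mem_filter hm)
    simp only [Function.comp_apply, this, id]
  -- bridge A's filtered entries to B's first match in the sorted bank
  have hfm : es = (pvLD.filter (fun db => q db.1)).map Prod.fst := by
    have h1 : pvLD.map Prod.fst = pvBank := by decide
    rw [hes, ← h1, List.filter_map]
    rfl
  have hchain : pvSel es none = pvSortedBank.find? q := by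
    have hrange : ∀ e ∈ pvLD, e.2 < 16 := by decide
    rw [hfm, pvSel_minK_none (pvLD.filter (fun db => q db.1))
      (fun e he => hrange e (List.mem_of_mem_filter he))
      ((by decide : pvLD.Pairwise (fun x y => x.2 < y.2)).filter _)]
    rw [pvMinK_perm (pvLD.filter (fun db => q db.1)) (pvSD.filter (fun db => q db.1))
      ((by decide : pvLD.Perm pvSD).filter _)
      ((by decide : ((pvLD.map pvK)).Nodup).sublist (List.Sublist.map pvK List.filter_sublist))]
    rw [pvMinK_find pvSD (fun db => q db.1) (by decide)]
    have hS : pvSortedBank = pvSD.map Prod.fst := by decide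
    rw [hS, List.find?_map]
    rfl
  simp only [PySem.Dict.keys, PySem.Dict.get?] at hA ⊢
  rw [hA]
  -- finish by cases on whether any word matched
  cases hE : pvSel es none with
  | none =>
    have hnil : es = [] := by
      cases hc : es with
      | nil => rfl
      | cons e t =>
        rw [hc] at hE
        simp only [pvSel, List.foldl] at hE
        exact absurd hE (pvSel_ne_none t e)
    rw [← hchain, hE]
    simp [hnil]
  | some b =>
    have hne : ¬ es = [] := by
      intro h; rw [h] at hE; simp [pvSel] at hE
    have hmem : ∀ wv ∈ es, ((Option.map (fun x => x.2) (List.find? (fun p => p.1 == wv.1) es)).getD 0) = wv.2 := by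
      intro wv hm
      have hnd : (es.map Prod.fst).Nodup := by
        rw [hes]; exact (by decide : ((pvBank.map Prod.fst)).Nodup).sublist (List.Sublist.map Prod.fst List.filter_sublist)
      rw [pv_find?_nodup es hnd wv hm]; rfl
    have hmax := pv_max_rel (fun k => (Option.map (fun x => x.2) (List.find? (fun p => p.1 == k) es)).getD 0) es none hmem (by simp)
    simp only [Option.map_none] at hmax
    have hbridge : PySem.List.max? (List.map (fun x : String × ℤ => x.1) es)
        (fun k => (Option.map (fun x : String × ℤ => x.2) (List.find? (fun p => p.1 == k) es)).getD 0)
        = List.foldl (fun (a : Option String) k =>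
            match a with
            | none => some k
            | some m => if (Option.map (fun x : String × ℤ => x.2) (List.find? (fun p => p.1 == m) es)).getD 0 <
                  (Option.map (fun x : String × ℤ => x.2) (List.find? (fun p => p.1 == k) es)).getD 0
                then some k else some m) none (List.map Prod.fst es) := by
      unfold PySem.List.max?
      congr 1
      funext a k
      cases a <;> rfl
    simp only [hne, if_false]
    rw [hbridge.trans hmax, hE, ← hchain, hE]
    rfl
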